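-- pv_equiv track=rewrite | github.com/xa8zz/erdos-harness | erdos-872/phase0/test_compute_psi.py | brute_force_beta
-- ===== SOURCE A (Python) =====
-- import itertools
--
-- def brute_force_beta(n: int, shields: list[int]) -> int:
--     lower = [x for x in range(2, n // 2 + 1) if all(u % x != 0 for u in shields)]
--     weights = {
--         x: n // x - n // (2 * x) - 1
--         for x in range(2, n // 2 + 1)
--     }
--     best = 0
--     for r in range(len(lower) + 1):
--         for subset in itertools.combinations(lower, r):
--             if all(a % b != 0 and b % a != 0 for i, a in enumerate(subset) for b in subset[i + 1 :]):
--                 best = max(best, sum(weights[x] for x in subset))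
--     return best
-- ===== SOURCE B (Python) =====
-- def brute_force_beta(n: int, shields: list[int]) -> int:
--     lower = [x for x in range(2, n // 2 + 1) if all(u % x for u in shields)]
--
--     def weight(x):
--         return n // x - n // (2 * x) - 1
--
--     def best(items):
--         if not items:
--             return 0
--         x, rest = items[0], items[1:]
--         compat = [y for y in rest if y % x and x % y]
--         return max(best(rest), weight(x) + best(compat))
--
--     return best(lower)
-- ===== Notes on version B (the rewrite author's own statement) =====
-- stated objective: alternative
-- what changed: A enumerates all 2^m subsets of the candidate list via itertools.combinations and checks each for pairwise incomparability; B computes the max-weight antichain by a branching recursion (take the head and recurse on the divisibility-compatible remainder, or skip it), so only antichains are ever explored and common prefixes are shared.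
import Mathlib
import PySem

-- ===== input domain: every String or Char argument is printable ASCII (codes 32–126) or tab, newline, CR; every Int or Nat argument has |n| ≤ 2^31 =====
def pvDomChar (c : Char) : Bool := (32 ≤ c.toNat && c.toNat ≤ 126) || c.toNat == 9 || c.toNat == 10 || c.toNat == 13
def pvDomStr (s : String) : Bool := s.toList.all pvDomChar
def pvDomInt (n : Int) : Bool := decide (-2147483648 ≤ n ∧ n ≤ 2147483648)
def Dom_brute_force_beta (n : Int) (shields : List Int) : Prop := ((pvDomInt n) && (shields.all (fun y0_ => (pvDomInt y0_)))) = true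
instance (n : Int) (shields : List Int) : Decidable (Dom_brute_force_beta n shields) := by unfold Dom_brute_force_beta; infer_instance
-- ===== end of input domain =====

-- B replaces A's enumerate-all-subsets-and-check search with a branching recursion that
-- only ever explores antichains (take the head and recurse on the compatible remainder, or skip it).


-- ===== PORT A =====
-- the generator check `all(a % b != 0 and b % a != 0 for i, a in enumerate(subset) for b in subset[i+1:])`,
-- transcribed structurally: each element is checked against the suffix after it
def pvAnti : List Int → Bool
  | [] => true
  | a :: rest =>
      (rest.all fun b => decide (PySem.Int.mod a b ≠ 0) && decide (PySem.Int.mod b a ≠ 0)) && pvAnti rest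

def brute_force_beta (n : Int) (shields : List Int) : Int :=
  let lower := (PySem.List.pyRange 2 (PySem.Int.floordiv n 2 + 1) 1).filter
      (fun x => shields.all fun u => decide (PySem.Int.mod u x ≠ 0))
  let weights : PySem.Dict Int Int := (PySem.List.pyRange 2 (PySem.Int.floordiv n 2 + 1) 1).foldl
      (fun d x => d.insert x (PySem.Int.floordiv n x - PySem.Int.floordiv n (2 * x) - 1)) PySem.Dict.empty
  -- `weights[x]` never raises KeyError: every x of a subset lies in `lower`, hence in the range the dict covers
  (List.range (lower.length + 1)).foldl
    (fun best r =>
      (PySem.List.combinations lower r).foldl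
        (fun best subset =>
          if pvAnti subset then
            max best (subset.foldl (fun acc x => acc + weights.getD x 0) 0)
          else best)
        best)
    0

-- ===== PORT B =====
def pvWeightB (n x : Int) : Int :=
  PySem.Int.floordiv n x - PySem.Int.floordiv n (2 * x) - 1

def pvBestB (n : Int) : List Int → Int
  | [] => 0
  | x :: rest =>
      let compat := rest.filter fun y => decide (PySem.Int.mod y x ≠ 0) && decide (PySem.Int.mod x y ≠ 0)
      max (pvBestB n rest) (pvWeightB n x + pvBestB n compat)
termination_by l => l.length
decreasing_by
  · simp
  · simp only [List.length_cons, List.length_unattach]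
    exact Nat.lt_succ_of_le (le_trans (List.length_filter_le _ _) (by simp))

def brute_force_beta_alt (n : Int) (shields : List Int) : Int :=
  pvBestB n ((PySem.List.pyRange 2 (PySem.Int.floordiv n 2 + 1) 1).filter
      (fun x => shields.all fun u => decide (PySem.Int.mod u x ≠ 0)))

-- ===== PRECONDITION & SPEC =====
def Spec_brute_force_beta (n : Int) (shields : List Int) (out : Int) : Prop := out = brute_force_beta_alt n shields
instance (n : Int) (shields : List Int) (out : Int) : Decidable (Spec_brute_force_beta n shields out) := by unfold Spec_brute_force_beta; infer_instance

-- ===== CLAIM (what is proved, stated in full; the proofs are below) =====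
def Claim_equal_brute_force_beta : Prop := ∀ (n : Int) (shields : List Int), Dom_brute_force_beta n shields → Spec_brute_force_beta n shields (brute_force_beta n shields)

-- ===== LEMMAS AND PROOFS =====

-- sum of B-weights over a subset
def pvSumW (n : Int) (s : List Int) : Int := s.foldl (fun acc x => acc + pvWeightB n x) 0

-- max over all antichain sublists: the common specification both ports are reduced to
def pvG (n : Int) (l : List Int) : Int :=
  ((l.sublists.filter pvAnti).map (pvSumW n)).foldl max 0

lemma pv_foldl_max_le (l : List Int) (b c : Int) (hb : b ≤ c) (h : ∀ x ∈ l, x ≤ c) :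
    l.foldl max b ≤ c := by
  induction l generalizing b with
  | nil => simpa using hb
  | cons a t ih =>
      exact ih (max b a) (max_le hb (h a (by simp))) (fun x hx => h x (by simp [hx]))

lemma pv_foldl_max_ext (b : Int) (l1 l2 : List Int) (h : ∀ x, x ∈ l1 ↔ x ∈ l2) :
    l1.foldl max b = l2.foldl max b := by
  apply le_antisymm
  · exact pv_foldl_max_le _ _ _ (PySem.List.le_foldl_max l2 b).1
      (fun x hx => (PySem.List.le_foldl_max l2 b).2 x ((h x).1 hx))
  · exact pv_foldl_max_le _ _ _ (PySem.List.le_foldl_max l1 b).1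
      (fun x hx => (PySem.List.le_foldl_max l1 b).2 x ((h x).2 hx))

lemma pv_mem_G_list (n : Int) (l : List Int) (v : Int) :
    v ∈ ((l.sublists.filter pvAnti).map (pvSumW n)) ↔
      ∃ s, s.Sublist l ∧ pvAnti s = true ∧ pvSumW n s = v := by
  simp [List.mem_filter, List.mem_sublists]
  tauto

lemma pv_sumW_cons (n x : Int) (t : List Int) :
    pvSumW n (x :: t) = pvWeightB n x + pvSumW n t := by
  simp [pvSumW, PySem.List.foldl_add]

lemma pv_sublist_filter (p : Int → Bool) (l t : List Int) :
    t.Sublist (l.filter p) ↔ t.Sublist l ∧ ∀ x ∈ t, p x = true := by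
  constructor
  · intro h
    refine ⟨h.trans List.filter_sublist, fun x hx => ?_⟩
    exact (List.mem_filter.mp (h.subset hx)).2
  · rintro ⟨h, hall⟩
    have : t.filter p = t := List.filter_eq_self.mpr hall
    simpa [this] using h.filter p

lemma pv_G_nonneg (n : Int) (l : List Int) : 0 ≤ pvG n l :=
  (PySem.List.le_foldl_max _ 0).1

lemma pv_le_G (n : Int) {l s : List Int} (hs : s.Sublist l) (ha : pvAnti s = true) :
    pvSumW n s ≤ pvG n l :=
  (PySem.List.le_foldl_max _ 0).2 _ ((pv_mem_G_list n l _).mpr ⟨s, hs, ha, rfl⟩)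

-- incompatibility test of B's filter agrees with the test inside pvAnti's `all`
lemma pv_anti_cons_iff (x : Int) (t : List Int) :
    pvAnti (x :: t) = true ↔
      (∀ y ∈ t, (decide (PySem.Int.mod y x ≠ 0) && decide (PySem.Int.mod x y ≠ 0)) = true)
        ∧ pvAnti t = true := by
  simp only [pvAnti, Bool.and_eq_true, List.all_eq_true, decide_eq_true_iff]
  constructor
  · rintro ⟨h1, h2⟩
    exact ⟨fun y hy => ⟨(h1 y hy).2, (h1 y hy).1⟩, h2⟩
  · rintro ⟨h1, h2⟩
    exact ⟨fun y hy => ⟨(h1 y hy).2, (h1 y hy).1⟩, h2⟩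

lemma pv_G_cons (n x : Int) (xs : List Int) :
    pvG n (x :: xs)
      = max (pvG n xs)
          (pvWeightB n x
            + pvG n (xs.filter fun y => decide (PySem.Int.mod y x ≠ 0) && decide (PySem.Int.mod x y ≠ 0))) := by
  set c : Int → Bool := fun y => decide (PySem.Int.mod y x ≠ 0) && decide (PySem.Int.mod x y ≠ 0) with hc
  apply le_antisymm
  · apply pv_foldl_max_le
    · exact le_max_of_le_left (pv_G_nonneg n xs)
    · intro v hv
      obtain ⟨s, hs, ha, rfl⟩ := (pv_mem_G_list n (x :: xs) v).mp hv
      rcases List.sublist_cons_iff.mp hs with h | ⟨t, rfl, ht⟩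
      · exact le_max_of_le_left (pv_le_G n h ha)
      · obtain ⟨hall, hat⟩ := (pv_anti_cons_iff x t).mp ha
        have htc : t.Sublist (xs.filter c) := (pv_sublist_filter c xs t).mpr ⟨ht, hall⟩
        rw [pv_sumW_cons]
        exact le_max_of_le_right (by
          have := pv_le_G n htc hat
          omega)
  · apply max_le
    · apply pv_foldl_max_le
      · exact pv_G_nonneg n (x :: xs)
      · intro v hv
        obtain ⟨s, hs, ha, rfl⟩ := (pv_mem_G_list n xs v).mp hv
        exact pv_le_G n (hs.trans (List.sublist_cons_self x xs)) ha
    · rcases PySem.List.foldl_max_mem ((((xs.filter c).sublists.filter pvAnti)).map (pvSumW n)) 0 with h0 | hmem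
      · -- the running max of the compatible branch is its base 0: bound by the singleton antichain [x]
        have hx : pvSumW n [x] ≤ pvG n (x :: xs) := by
          apply pv_le_G n
          · exact (List.nil_sublist xs).cons₂ x
          · simp [pvAnti]
        have h0' : pvG n (xs.filter c) = 0 := h0
        rw [h0']
        have hx' : pvSumW n [x] = pvWeightB n x + 0 := by
          simp [pvSumW]
        rw [hx'] at hx
        exact hx
      · obtain ⟨t, htmem, heq⟩ := List.mem_map.mp hmem
        have ht := List.mem_filter.mp htmem
        obtain ⟨htc, hall⟩ := (pv_sublist_filter c xs t).mp (List.mem_sublists.mp ht.1)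
        have hle : pvSumW n (x :: t) ≤ pvG n (x :: xs) := by
          apply pv_le_G n
          · exact htc.cons₂ x
          · exact (pv_anti_cons_iff x t).mpr ⟨hall, ht.2⟩
        rw [pv_sumW_cons] at hle
        have h2 : pvG n (xs.filter c) = pvSumW n t := heq.symm
        rw [h2]
        exact hle

lemma pv_G_nil (n : Int) : pvG n [] = 0 := by
  simp [pvG, pvSumW, pvAnti]

-- B computes pvG
lemma pv_bestB_eq_G (n : Int) (l : List Int) : pvBestB n l = pvG n l := by
  have key : ∀ (k : Nat) (l : List Int), l.length ≤ k → pvBestB n l = pvG n l := by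
    intro k
    induction k with
    | zero =>
        intro l hl
        have : l = [] := List.eq_nil_of_length_eq_zero (Nat.le_zero.mp hl)
        subst this
        simp [pvBestB, pv_G_nil]
    | succ k ih =>
        intro l hl
        match l with
        | [] => simp [pvBestB, pv_G_nil]
        | x :: rest =>
            have h1 : rest.length ≤ k := by simpa using hl
            have h2 : (rest.filter fun y =>
                decide (PySem.Int.mod y x ≠ 0) && decide (PySem.Int.mod x y ≠ 0)).length ≤ k :=
              le_trans (List.length_filter_le _ _) h1
            rw [pvBestB, ih _ h1, ih _ h2, pv_G_cons]
  exact key l.length l le_rfl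

-- A's inner conditional fold is a fold of max over the filtered mapped list
lemma pv_inner_fold (dsum : List Int → Int) (L : List (List Int)) (b : Int) :
    L.foldl (fun best s => if pvAnti s then max best (dsum s) else best) b
      = ((L.filter pvAnti).map dsum).foldl max b := by
  induction L generalizing b with
  | nil => rfl
  | cons s t ih =>
      by_cases h : pvAnti s = true <;> simp [h, ih]

lemma pv_outer_fold (dsum : List Int → Int) (K : Nat → List (List Int)) (rs : List Nat) (b : Int) :
    rs.foldl (fun best r => ((K r).filter pvAnti |>.map dsum).foldl max best) b
      = ((rs.flatMap K).filter pvAnti |>.map dsum).foldl max b := by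
  induction rs generalizing b with
  | nil => rfl
  | cons r t ih => simp [ih, List.filter_append, List.map_append, List.foldl_append]

-- dict built by inserting f k for k over l: lookup is f x for x ∈ l
lemma pv_getD_foldl_insert (l : List Int) (f : Int → Int) (d : PySem.Dict Int Int) (x : Int) :
    (l.foldl (fun d k => d.insert k (f k)) d).getD x 0
      = if x ∈ l then f x else d.getD x 0 := by
  induction l generalizing d with
  | nil => simp
  | cons a t ih =>
      simp only [List.foldl_cons, ih, PySem.Dict.getD_insert, List.mem_cons]
      by_cases hx : x ∈ t <;> by_cases ha : x = a <;> simp [hx, ha]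

-- A's double fold over all combination sizes is the fold of max over all antichain sublists
lemma pv_A_fold (dsum : List Int → Int) (lower : List Int) :
    (List.range (lower.length + 1)).foldl
      (fun best r =>
        (PySem.List.combinations lower r).foldl
          (fun best subset => if pvAnti subset then max best (dsum subset) else best) best) 0
      = ((lower.sublists.filter pvAnti).map dsum).foldl max 0 := by
  have hfun : (fun (best : Int) (r : Nat) =>
      (PySem.List.combinations lower r).foldl
        (fun best subset => if pvAnti subset then max best (dsum subset) else best) best)
      = fun best r => (((PySem.List.combinations lower r).filter pvAnti).map dsum).foldl max best :=
    funext fun b => funext fun r => pv_inner_fold dsum _ b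
  rw [hfun, pv_outer_fold]
  apply pv_foldl_max_ext
  intro v
  simp only [List.mem_map, List.mem_filter, List.mem_flatMap, List.mem_range,
    PySem.List.mem_combinations_iff, List.mem_sublists]
  constructor
  · rintro ⟨s, ⟨⟨r, _, hs, _⟩, ha⟩, rfl⟩
    exact ⟨s, ⟨hs, ha⟩, rfl⟩
  · rintro ⟨s, ⟨hs, ha⟩, rfl⟩
    exact ⟨s, ⟨⟨s.length, Nat.lt_succ_of_le hs.length_le, hs, rfl⟩, ha⟩, rfl⟩

theorem brute_force_beta_A_eq_G (n : Int) (shields : List Int) :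
    brute_force_beta n shields
      = pvG n ((PySem.List.pyRange 2 (PySem.Int.floordiv n 2 + 1) 1).filter
          (fun x => shields.all fun u => decide (PySem.Int.mod u x ≠ 0))) := by
  unfold brute_force_beta
  set R := PySem.List.pyRange 2 (PySem.Int.floordiv n 2 + 1) 1 with hR
  set lower := R.filter (fun x => shields.all fun u => decide (PySem.Int.mod u x ≠ 0)) with hlow
  set W := R.foldl
      (fun (d : PySem.Dict Int Int) x =>
        d.insert x (PySem.Int.floordiv n x - PySem.Int.floordiv n (2 * x) - 1)) PySem.Dict.empty
    with hW
  rw [pv_A_fold]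
  unfold pvG
  congr 1
  apply List.map_congr_left
  intro s hsmem
  have hs : s.Sublist lower := List.mem_sublists.mp (List.mem_filter.mp hsmem).1
  apply PySem.List.foldl_congr_mem
  intro acc x hx
  have hxR : x ∈ R := List.mem_of_mem_filter (hs.subset hx)
  have : W.getD x 0 = pvWeightB n x := by
    rw [hW, pv_getD_foldl_insert R (fun k => PySem.Int.floordiv n k - PySem.Int.floordiv n (2 * k) - 1)]
    simp [hxR, pvWeightB]
  rw [this]

-- ===== VERDICT (by name: the statement is the Claim_ definition above) =====
theorem brute_force_beta_spec : Claim_equal_brute_force_beta := by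
  intro n shields _
  unfold Spec_brute_force_beta brute_force_beta_alt
  rw [brute_force_beta_A_eq_G, pv_bestB_eq_G]
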